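-- pv_equiv track=rewrite | github.com/AyaLahlou/TransJAX | src/transjax/agents/utils/doc_generator.py | _external_deps_section
-- ===== SOURCE A (Python) =====
-- from collections import defaultdict
-- from typing import Any, Dict, List, Optional, Tuple
--
-- def _external_deps_section(
--     ext_deps: List[str], modules_data: Dict[str, Any]
-- ) -> List[str]:
--     lines = [
--         "The following external Fortran modules are referenced but not translated "
--         "(they must be available at link time or mocked in JAX):",
--         "",
--     ]
--     # Group by likely library
--     known_libs = {
--         "netcdf": ["netcdf", "nc_"], "mpi": ["mpi", "mpi_"],
--         "hdf5": ["hdf5", "h5_"], "lapack": ["lapack", "blas"],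
--         "shr": ["shr_"], "pio": ["pio"],
--     }
--     grouped: Dict[str, List[str]] = defaultdict(list)
--     for dep in sorted(ext_deps):
--         placed = False
--         for lib, prefixes in known_libs.items():
--             if any(dep.lower().startswith(p) or p in dep.lower() for p in prefixes):
--                 grouped[lib].append(dep)
--                 placed = True
--                 break
--         if not placed:
--             grouped["other"].append(dep)
--
--     for lib, mods in sorted(grouped.items()):
--         lines.append(f"**{lib.upper()}**: {', '.join(f'`{m}`' for m in mods)}")
--     lines.append("")
--     return lines
-- ===== SOURCE B (Python) =====
-- HEADER = ("The following external Fortran modules are referenced but not translated "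
--           "(they must be available at link time or mocked in JAX):")
--
-- KNOWN_LIBS = [
--     ("netcdf", ["netcdf", "nc_"]), ("mpi", ["mpi", "mpi_"]),
--     ("hdf5", ["hdf5", "h5_"]), ("lapack", ["lapack", "blas"]),
--     ("shr", ["shr_"]), ("pio", ["pio"]),
-- ]
--
-- ALL_LIBS = ["hdf5", "lapack", "mpi", "netcdf", "other", "pio", "shr"]
--
--
-- def _classify(dep):
--     low = dep.lower()
--     for lib, prefixes in KNOWN_LIBS:
--         if any(low.startswith(p) or p in low for p in prefixes):
--             return lib
--     return "other"
--
--
-- def _external_deps_section(ext_deps, modules_data):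
--     tagged = [(_classify(d), d) for d in sorted(ext_deps)]
--     lines = [HEADER, ""]
--     for lib in ALL_LIBS:
--         mods = [d for c, d in tagged if c == lib]
--         if mods:
--             lines.append("**%s**: %s" % (lib.upper(), ", ".join("`%s`" % m for m in mods)))
--     lines.append("")
--     return lines
-- ===== Notes on version B (the rewrite author's own statement) =====
-- stated objective: idiomatic
-- what changed: Replaces the defaultdict accumulation plus sorting of the dict's items by a classify(dep) helper and one filter pass per library name taken from a fixed, already alphabetically ordered list, so no dict and no item sort exist in B.
import Mathlib
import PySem

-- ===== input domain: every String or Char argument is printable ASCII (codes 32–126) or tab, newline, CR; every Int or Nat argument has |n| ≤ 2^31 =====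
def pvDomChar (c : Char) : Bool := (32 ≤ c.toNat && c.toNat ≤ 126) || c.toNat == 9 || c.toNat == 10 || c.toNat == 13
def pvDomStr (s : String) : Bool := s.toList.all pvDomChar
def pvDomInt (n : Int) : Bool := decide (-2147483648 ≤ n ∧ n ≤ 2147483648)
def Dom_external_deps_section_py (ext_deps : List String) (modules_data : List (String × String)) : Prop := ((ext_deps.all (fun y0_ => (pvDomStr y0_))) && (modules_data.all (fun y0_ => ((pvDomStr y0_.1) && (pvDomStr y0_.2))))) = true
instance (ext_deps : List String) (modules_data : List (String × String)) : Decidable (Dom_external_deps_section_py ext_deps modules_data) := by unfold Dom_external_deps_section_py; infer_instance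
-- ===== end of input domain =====

-- B replaces A's defaultdict accumulation + sort of the dict items by a classify helper and
-- one filter pass per library name from a fixed alphabetically ordered list (idiomatic; not faster).

-- shared literal constants (identical text in both Pythons) and the identical line formatting
def pvHeader : List String :=
  ["The following external Fortran modules are referenced but not translated (they must be available at link time or mocked in JAX):",
   ""]

def pvKnownLibs : List (String × List String) :=
  [("netcdf", ["netcdf", "nc_"]), ("mpi", ["mpi", "mpi_"]),
   ("hdf5", ["hdf5", "h5_"]), ("lapack", ["lapack", "blas"]),
   ("shr", ["shr_"]), ("pio", ["pio"])]

-- dep.lower().startswith(p) or p in dep.lower()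
def pvMatch (dep p : String) : Bool :=
  PySem.Str.startswith (PySem.Str.lower dep) p || PySem.Str.isIn p (PySem.Str.lower dep)

-- f"**{lib.upper()}**: {', '.join(f'`{m}`' for m in mods)}"
def pvFmtLine (lib : String) (mods : List String) : String :=
  PySem.Str.join "" ["**", PySem.Str.upper lib, "**: ",
    PySem.Str.join ", " (mods.map (fun m => PySem.Str.join "" ["`", m, "`"]))]

-- ===== PORT A =====
-- the inner 'for lib, prefixes in known_libs.items(): … break' loop with the 'placed' flag:
-- on the first matching lib (or "other" when none matches) do grouped[lib].append(dep)
def pvPlaceA (d : PySem.Dict String (List String)) (dep : String) :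
    List (String × List String) → PySem.Dict String (List String)
  | [] => d.insert "other" (d.getD "other" [] ++ [dep])
  | (lib, ps) :: rest =>
      if ps.any (pvMatch dep) then d.insert lib (d.getD lib [] ++ [dep])
      else pvPlaceA d dep rest

def external_deps_section_py (ext_deps : List String) (modules_data : List (String × String)) : List String :=
  let grouped := (PySem.List.sorted ext_deps (fun x => x) false).foldl
      (fun d dep => pvPlaceA d dep pvKnownLibs) PySem.Dict.empty
  -- sorted(grouped.items()): the dict's keys are distinct, so Python's tuple comparison is
  -- decided by the key alone — sorting with key = fst is exact here
  ((PySem.List.sorted grouped.items (fun p => p.1) false).foldl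
      (fun acc p => acc ++ [pvFmtLine p.1 p.2]) pvHeader) ++ [""]

-- ===== PORT B =====
def pvAllLibs : List String := ["hdf5", "lapack", "mpi", "netcdf", "other", "pio", "shr"]

-- _classify: first lib whose prefixes match, else "other"
def pvClassifyGo (dep : String) : List (String × List String) → String
  | [] => "other"
  | (lib, ps) :: rest => if ps.any (pvMatch dep) then lib else pvClassifyGo dep rest

def pvClassify (dep : String) : String := pvClassifyGo dep pvKnownLibs

def external_deps_section_py_alt (ext_deps : List String) (modules_data : List (String × String)) : List String :=
  let tagged := (PySem.List.sorted ext_deps (fun x => x) false).map (fun d => (pvClassify d, d))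
  (pvAllLibs.foldl (fun acc lib =>
      let mods := (tagged.filter (fun p => p.1 == lib)).map (fun p => p.2)
      if mods.isEmpty then acc else acc ++ [pvFmtLine lib mods]) pvHeader) ++ [""]

-- ===== PRECONDITION & SPEC =====
def Spec_external_deps_section_py (ext_deps : List String) (modules_data : List (String × String)) (out : List String) : Prop := out = external_deps_section_py_alt ext_deps modules_data
instance (ext_deps : List String) (modules_data : List (String × String)) (out : List String) : Decidable (Spec_external_deps_section_py ext_deps modules_data out) := by unfold Spec_external_deps_section_py; infer_instance

-- ===== CLAIM (what is proved, stated in full; the proofs are below) =====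
def Claim_equal_external_deps_section_py : Prop := ∀ (ext_deps : List String) (modules_data : List (String × String)), Dom_external_deps_section_py ext_deps modules_data → Spec_external_deps_section_py ext_deps modules_data (external_deps_section_py ext_deps modules_data)

-- ===== LEMMAS AND PROOFS =====

-- A's inner break loop places dep exactly at key pvClassify dep
theorem pvPlaceA_eq (d : PySem.Dict String (List String)) (dep : String) :
    pvPlaceA d dep pvKnownLibs
      = d.insert (pvClassify dep) (d.getD (pvClassify dep) [] ++ [dep]) := by
  simp only [pvClassify, pvKnownLibs, pvPlaceA, pvClassifyGo]
  split_ifs <;> rfl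

theorem pvClassify_mem (dep : String) : pvClassify dep ∈ pvAllLibs := by
  simp only [pvClassify, pvKnownLibs, pvClassifyGo]
  split_ifs <;> simp [pvAllLibs]

theorem group_getD (l : List String) (d : PySem.Dict String (List String)) (k : String) :
    (l.foldl (fun d dep => d.insert (pvClassify dep) (d.getD (pvClassify dep) [] ++ [dep])) d).getD k []
      = d.getD k [] ++ l.filter (fun dep => pvClassify dep == k) := by
  induction l generalizing d with
  | nil => simp
  | cons dep t ih =>
      simp only [List.foldl_cons, List.filter_cons, ih, PySem.Dict.getD_insert]
      by_cases h : pvClassify dep = k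
      · simp [h]
      · simp [h, Ne.symm h]

theorem pvAllLibs_sorted : List.Pairwise (· < ·) pvAllLibs := by
  simp only [pvAllLibs, List.pairwise_cons, List.mem_cons, List.not_mem_nil, String.lt_iff_toList_lt]
  norm_num
  decide

-- B's tag-once list, projected back per library, is the per-library filter
theorem tagged_filter (l : List String) (k : String) :
    (((l.map (fun d => (pvClassify d, d))).filter (fun p => p.1 == k)).map (fun p => p.2))
      = l.filter (fun d => pvClassify d == k) := by
  simp only [List.filter_map, List.map_map]
  exact (List.map_id _).symm ▸ rfl

theorem external_deps_section_py_spec' :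
    ∀ (ext_deps : List String) (modules_data : List (String × String)),
      external_deps_section_py ext_deps modules_data
        = external_deps_section_py_alt ext_deps modules_data := by
  intro ext_deps modules_data
  unfold external_deps_section_py external_deps_section_py_alt
  dsimp only
  set deps := PySem.List.sorted ext_deps (fun x => x) false with hdeps
  -- name the classify-grouped filters
  set filt : String → List String := fun k => deps.filter (fun dep => pvClassify dep == k) with hfilt
  -- A's grouping fold, rewritten through pvPlaceA_eq
  have hfold : deps.foldl (fun d dep => pvPlaceA d dep pvKnownLibs) PySem.Dict.empty
      = deps.foldl (fun d dep => d.insert (pvClassify dep) (d.getD (pvClassify dep) [] ++ [dep])) PySem.Dict.empty :=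
    PySem.List.foldl_congr_mem _ _ _ _ (fun d dep _ => pvPlaceA_eq d dep)
  rw [hfold]
  set grouped := deps.foldl (fun d dep => d.insert (pvClassify dep) (d.getD (pvClassify dep) [] ++ [dep])) PySem.Dict.empty with hg
  -- keys of the grouped dict
  have hkeys : grouped.keys = PySem.Set.ofList (deps.map pvClassify) := by
    rw [hg, PySem.Dict.keys_foldl_insert_key]
    simp [PySem.Set.update, PySem.Set.ofList_eq_foldl]
  have hnodup : grouped.keys.Nodup := by
    rw [hkeys]; exact PySem.Set.nodup_ofList _
  have hgetD : ∀ k, grouped.getD k [] = filt k := by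
    intro k; rw [hg, group_getD]; simp [hfilt]
  -- the grouped items list
  have hitems : grouped.items = grouped.keys.map (fun k => (k, filt k)) := by
    rw [PySem.Dict.items_eq_map_keys grouped hnodup []]
    exact List.map_congr_left (fun k _ => by rw [hgetD])
  -- B's nonempty-library list
  set libs := pvAllLibs.filter (fun lib => !(filt lib).isEmpty) with hlibs
  -- the sorted items are exactly B's libs with their filters
  have hsorted : PySem.List.sorted grouped.items (fun p => p.1) false
      = libs.map (fun k => (k, filt k)) := by
    apply PySem.List.sorted_eq_of_perm_of_pairwise_lt
    · -- permutation: both are nodup with the same members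
      rw [hitems, hkeys]
      apply List.Perm.map
      rw [List.perm_ext_iff_of_nodup]
      · intro k
        rw [hlibs, List.mem_filter, PySem.Set.mem_ofList]
        constructor
        · rintro ⟨hmem, hne⟩
          rcases List.isEmpty_eq_false_iff_exists_mem.mp (by simpa using hne) with ⟨dep, hdep⟩
          rw [hfilt] at hdep
          rcases List.mem_filter.mp hdep with ⟨hd, hck⟩
          exact List.mem_map.mpr ⟨dep, hd, by simpa using hck⟩
        · rintro hk
          rcases List.mem_map.mp hk with ⟨dep, hd, hck⟩
          refine ⟨hck ▸ pvClassify_mem dep, ?_⟩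
          have : dep ∈ filt k := by
            rw [hfilt]; exact List.mem_filter.mpr ⟨hd, by simp [hck]⟩
          simpa using List.ne_nil_of_mem this
      · exact List.Nodup.filter _ (by decide)
      · exact PySem.Set.nodup_ofList _
    · -- strictly increasing keys
      rw [List.pairwise_map]
      exact List.Pairwise.filter _ pvAllLibs_sorted
  -- finish: turn both folds into maps over libs
  rw [hsorted, PySem.List.foldl_append_singleton_eq_map, List.map_map]
  have hB : pvAllLibs.foldl (fun acc lib =>
        if (((deps.map (fun d => (pvClassify d, d))).filter (fun p => p.1 == lib)).map (fun p => p.2)).isEmpty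
        then acc
        else acc ++ [pvFmtLine lib (((deps.map (fun d => (pvClassify d, d))).filter (fun p => p.1 == lib)).map (fun p => p.2))]) pvHeader
      = pvHeader ++ libs.map (fun lib => pvFmtLine lib (filt lib)) := by
    rw [PySem.List.foldl_congr_mem _ _
      (fun acc lib => if (filt lib).isEmpty then acc else acc ++ [pvFmtLine lib (filt lib)]) _
      (fun acc lib _ => by simp only [tagged_filter]; rfl)]
    rw [hlibs]
    have := PySem.List.foldl_append_if (l := pvAllLibs)
      (p := fun lib => !(filt lib).isEmpty) (f := fun lib => pvFmtLine lib (filt lib))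
      (acc := pvHeader)
    rw [← this]
    exact PySem.List.foldl_congr_mem _ _ _ _ (fun acc lib _ => by cases (filt lib).isEmpty <;> simp)
  rw [hB]
  rfl

-- ===== VERDICT (by name: the statement is the Claim_ definition above) =====
theorem external_deps_section_py_spec : Claim_equal_external_deps_section_py := by
  intro ext_deps modules_data _
  exact external_deps_section_py_spec' ext_deps modules_data
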